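-- pv_equiv track=rewrite | github.com/RobinDong/revise_algorithm | dynamic_programming/shortest_sum.py | shortest_sum
-- ===== SOURCE A (Python) =====
-- def shortest_sum(target_sum, array, mem):
--     if target_sum in mem:
--         return mem[target_sum]
--
--     if target_sum == 0:
--         return []
--
--     if target_sum < 0:
--         return None
--
--     shortest_arr = None
--     for item in array:
--         remain = target_sum - item
--         result = shortest_sum(remain, array, mem)
--         if result is None:
--             continue
--         result = result + [item]
--         if shortest_arr is None or len(shortest_arr) > len(result):
--             shortest_arr = result
--
--     mem[target_sum] = shortest_arr
--     return shortest_arr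
-- ===== SOURCE B (Python) =====
-- # Bottom-up tabulation instead of top-down memoized recursion.
-- # Return-value equivalence only: A fills `mem` with the recursively reachable
-- # subproblems, B fills it with every value 1..target_sum not already present.
-- def shortest_sum(target_sum, array, mem):
--     if target_sum in mem:
--         return mem[target_sum]
--     if target_sum == 0:
--         return []
--     if target_sum < 0:
--         return None
--
--     def value(w):
--         if w in mem:
--             return mem[w]
--         if w == 0:
--             return []
--         return None  # negative, or not yet tabulated
--
--     for v in range(1, target_sum + 1):
--         if v in mem:
--             continue
--         cur = None
--         for item in array:
--             sub = value(v - item)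
--             if sub is not None:
--                 cand = sub + [item]
--                 if cur is None or len(cur) > len(cand):
--                     cur = cand
--         mem[v] = cur
--     return mem[target_sum]
-- ===== Notes on version B (the rewrite author's own statement) =====
-- stated objective: alternative
-- what changed: Replaced A's top-down memoized recursion with a bottom-up tabulation loop that fills the memo table for v = 1..target_sum in ascending order (same selection and tie-break, no recursion).
-- outside the precondition, e.g. on shortest_sum(5, [0, 2], {}): A raises RecursionError, B returns None; on shortest_sum(3, [-1, 2], {}): A raises RecursionError, B returns None; on shortest_sum(1, [-1], {3: [9]}): A returns [9, -1, -1], B returns None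
import Mathlib
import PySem

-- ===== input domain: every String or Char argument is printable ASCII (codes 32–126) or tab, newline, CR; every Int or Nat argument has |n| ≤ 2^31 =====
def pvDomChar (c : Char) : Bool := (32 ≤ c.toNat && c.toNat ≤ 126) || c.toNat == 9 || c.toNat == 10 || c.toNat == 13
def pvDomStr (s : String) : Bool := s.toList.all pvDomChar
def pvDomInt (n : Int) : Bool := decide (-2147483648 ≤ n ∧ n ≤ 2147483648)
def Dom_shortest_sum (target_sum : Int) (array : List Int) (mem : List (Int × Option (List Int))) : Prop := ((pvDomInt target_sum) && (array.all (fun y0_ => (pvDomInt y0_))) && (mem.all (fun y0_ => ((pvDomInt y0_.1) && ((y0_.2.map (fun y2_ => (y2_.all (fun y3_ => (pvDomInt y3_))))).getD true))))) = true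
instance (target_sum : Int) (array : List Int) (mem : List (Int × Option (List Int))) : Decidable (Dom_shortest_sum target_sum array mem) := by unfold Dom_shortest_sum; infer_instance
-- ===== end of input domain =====

-- B replaces A's top-down memoized recursion by bottom-up tabulation over 1..target_sum
-- (objective: alternative). Return-value equivalence only: A fills the caller's `mem`
-- with the recursively reachable subproblems, B with every value 1..target_sum not present.

-- ===== PORT A =====
-- Literal port of A's recursion; the Nat fuel only makes the recursion total
-- (under Pre_ the fuel target_sum.toNat + 1 is never exhausted).
def shortestSumGo (array : List Int) : Nat → Int → PySem.Dict Int (Option (List Int)) → (Option (List Int)) × PySem.Dict Int (Option (List Int))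
  | 0, _, mem => (none, mem)
  | f+1, target_sum, mem =>
    match mem.get? target_sum with
    | some x => (x, mem)
    | none =>
      if target_sum = 0 then (some [], mem)
      else if target_sum < 0 then (none, mem)
      else
        let p := array.foldl (fun (p : (Option (List Int)) × PySem.Dict Int (Option (List Int))) item =>
          let res := shortestSumGo array f (target_sum - item) p.2
          match res.1 with
          | none => (p.1, res.2)
          | some r =>
            let result := r ++ [item]
            match p.1 with
            | none => (some result, res.2)
            | some s => if s.length > result.length then (some result, res.2) else (p.1, res.2)) (none, mem)
        (p.1, p.2.insert target_sum p.1)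

def shortest_sum (target_sum : Int) (array : List Int) (mem : List (Int × Option (List Int))) : Option (List Int) :=
  (shortestSumGo array (target_sum.toNat + 1) target_sum (PySem.Dict.ofList mem)).1

-- ===== PORT B =====
-- helper `value(w)` of Source B
def ssValue (mem : PySem.Dict Int (Option (List Int))) (w : Int) : Option (List Int) :=
  match mem.get? w with
  | some x => x
  | none => if w = 0 then some [] else none

-- one iteration of Source B's `for v in range(1, target_sum + 1)` loop body
def ssStep (array : List Int) (mem : PySem.Dict Int (Option (List Int))) (v : Int) : PySem.Dict Int (Option (List Int)) :=
  match mem.get? v with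
  | some _ => mem
  | none =>
    mem.insert v (array.foldl (fun cur item =>
      match ssValue mem (v - item) with
      | none => cur
      | some sub =>
        let cand := sub ++ [item]
        match cur with
        | none => some cand
        | some c => if c.length > cand.length then some cand else cur) none)

def shortest_sum_alt (target_sum : Int) (array : List Int) (mem : List (Int × Option (List Int))) : Option (List Int) :=
  let d := PySem.Dict.ofList mem
  match d.get? target_sum with
  | some x => x
  | none =>
    if target_sum = 0 then some []
    else if target_sum < 0 then none
    else
      let d' := (PySem.List.pyRange 1 (target_sum + 1) 1).foldl (ssStep array) d
      -- final `return mem[target_sum]`: the key is always present here (v = target_sum was processed)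
      (d'.get? target_sum).getD none

-- ===== PRECONDITION & SPEC =====
-- Pre_ excludes the inputs whose recursion meets a non-positive array element: there A almost always
-- hits Python's recursion limit (RecursionError), and in the rare cases where mem entries above
-- target_sum let A return, its value is built from subproblems larger than target_sum, which a
-- bottom-up table bounded by target_sum does not cover.
def Pre_shortest_sum (target_sum : Int) (array : List Int) (mem : List (Int × Option (List Int))) : Prop :=
  (∀ a ∈ array, 0 < a) ∨ (PySem.Dict.ofList mem).contains target_sum = true ∨ target_sum ≤ 0
instance (target_sum : Int) (array : List Int) (mem : List (Int × Option (List Int))) : Decidable (Pre_shortest_sum target_sum array mem) := by unfold Pre_shortest_sum; infer_instance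

def pvWitness_shortest_sum : Int × List Int × (List (Int × Option (List Int))) := (6, [1, 2, 3], [(4, some [2, 2])])

def Spec_shortest_sum (target_sum : Int) (array : List Int) (mem : List (Int × Option (List Int))) (out : Option (List Int)) : Prop := out = shortest_sum_alt target_sum array mem
instance (target_sum : Int) (array : List Int) (mem : List (Int × Option (List Int))) (out : Option (List Int)) : Decidable (Spec_shortest_sum target_sum array mem out) := by unfold Spec_shortest_sum; infer_instance

-- ===== CLAIM (what is proved, stated in full; the proofs are below) =====
def Claim_equal_shortest_sum : Prop := ∀ (target_sum : Int) (array : List Int) (mem : List (Int × Option (List Int))), Dom_shortest_sum target_sum array mem → Pre_shortest_sum target_sum array mem → Spec_shortest_sum target_sum array mem (shortest_sum target_sum array mem)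

-- ===== LEMMAS AND PROOFS =====

-- the table after B has processed v = 1..k
def ssMems (array : List Int) (m0 : PySem.Dict Int (Option (List Int))) : Nat → PySem.Dict Int (Option (List Int))
  | 0 => m0
  | k+1 => ssStep array (ssMems array m0 k) ((k : Int) + 1)

-- the canonical value of subproblem w
def ssV (array : List Int) (m0 : PySem.Dict Int (Option (List Int))) (w : Int) : Option (List Int) :=
  ssValue (ssMems array m0 w.toNat) w

-- the pure selection fold both programs perform, over given subproblem values g
def ssFoldP (l : List Int) (g : Int → Option (List Int)) (cur : Option (List Int)) : Option (List Int) :=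
  l.foldl (fun cur item =>
    match g item with
    | none => cur
    | some sub =>
      let cand := sub ++ [item]
      match cur with
      | none => some cand
      | some c => if c.length > cand.length then some cand else cur) cur

theorem ssFoldP_congr (l : List Int) (g1 g2 : Int → Option (List Int)) (cur : Option (List Int))
    (h : ∀ i ∈ l, g1 i = g2 i) : ssFoldP l g1 cur = ssFoldP l g2 cur := by
  induction l generalizing cur with
  | nil => rfl
  | cons a l ih =>
    simp only [ssFoldP, List.foldl_cons] at *
    rw [h a (by simp)]
    exact ih _ (fun i hi => h i (by simp [hi]))

-- m0 entries survive tabulation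
theorem ssMems_preserve (array : List Int) (m0 : PySem.Dict Int (Option (List Int))) (k : Nat)
    (w : Int) (y : Option (List Int)) (h : m0.get? w = some y) : (ssMems array m0 k).get? w = some y := by
  induction k with
  | zero => exact h
  | succ k ih =>
    simp only [ssMems, ssStep]
    cases hv : (ssMems array m0 k).get? ((k : Int) + 1) with
    | some _ => exact ih
    | none =>
      rcases eq_or_ne w ((k : Int) + 1) with rfl | hne
      · rw [ih] at hv; exact absurd hv (by simp)
      · rw [PySem.Dict.get?_insert_of_ne _ _ hne]; exact ih

-- keys of the table are m0's keys plus 1..k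
theorem ssMems_keybound (array : List Int) (m0 : PySem.Dict Int (Option (List Int))) (k : Nat)
    (w : Int) (h : (ssMems array m0 k).get? w ≠ none) :
    m0.get? w ≠ none ∨ (1 ≤ w ∧ w ≤ (k : Int)) := by
  induction k with
  | zero => exact Or.inl h
  | succ k ih =>
    simp only [ssMems, ssStep] at h
    cases hv : (ssMems array m0 k).get? ((k : Int) + 1) with
    | some x =>
      rw [hv] at h
      rcases ih h with h' | ⟨h1, h2⟩
      · exact Or.inl h'
      · exact Or.inr ⟨h1, by push_cast; omega⟩
    | none =>
      rw [hv] at h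
      rcases eq_or_ne w ((k : Int) + 1) with rfl | hne
      · exact Or.inr ⟨by omega, by omega⟩
      · rw [PySem.Dict.get?_insert_of_ne _ _ hne] at h
        rcases ih h with h' | ⟨h1, h2⟩
        · exact Or.inl h'
        · exact Or.inr ⟨h1, by push_cast; omega⟩

-- entries already present are stable under further tabulation steps
theorem ssMems_stable (array : List Int) (m0 : PySem.Dict Int (Option (List Int))) (k : Nat)
    (w : Int) (hw : w.toNat ≤ k) : (ssMems array m0 k).get? w = (ssMems array m0 w.toNat).get? w := by
  induction k with
  | zero =>
    have h0 : w.toNat = 0 := by omega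
    rw [h0]
  | succ k ih =>
    rcases Nat.lt_or_ge k w.toNat with h | h
    · have : w.toNat = k + 1 := by omega
      rw [this]
    · have hne : w ≠ (k : Int) + 1 := by
        intro h'; subst h'; omega
      simp only [ssMems, ssStep]
      cases hv : (ssMems array m0 k).get? ((k : Int) + 1) with
      | some _ => exact ih h
      | none => rw [PySem.Dict.get?_insert_of_ne _ _ hne]; exact ih h

theorem ssValue_stable (array : List Int) (m0 : PySem.Dict Int (Option (List Int))) (k : Nat)
    (w : Int) (hw : w.toNat ≤ k) : ssValue (ssMems array m0 k) w = ssV array m0 w := by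
  simp only [ssV, ssValue, ssMems_stable array m0 k w hw]

-- the value the tabulation computes and stores at step v = k+1 (fresh key) is ssV v
theorem ssMems_stepval (array : List Int) (hpos : ∀ a ∈ array, 0 < a)
    (m0 : PySem.Dict Int (Option (List Int))) (k : Nat)
    (h : (ssMems array m0 k).get? ((k : Int) + 1) = none) :
    (ssMems array m0 (k+1)).get? ((k : Int) + 1)
      = some (ssFoldP array (fun item => ssV array m0 ((k : Int) + 1 - item)) none) := by
  simp only [ssMems, ssStep, h]
  rw [PySem.Dict.get?_insert_self]
  congr 1
  have : (array.foldl (fun cur item =>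
      match ssValue (ssMems array m0 k) ((k : Int) + 1 - item) with
      | none => cur
      | some sub =>
        let cand := sub ++ [item]
        match cur with
        | none => some cand
        | some c => if c.length > cand.length then some cand else cur) none)
      = ssFoldP array (fun item => ssValue (ssMems array m0 k) ((k : Int) + 1 - item)) none := rfl
  rw [this]
  apply ssFoldP_congr
  intro i hi
  apply ssValue_stable
  have := hpos i hi
  omega

-- value of ssV on the four kinds of inputs
theorem ssV_mem (array : List Int) (m0 : PySem.Dict Int (Option (List Int))) (w : Int)
    (x : Option (List Int)) (h : m0.get? w = some x) : ssV array m0 w = x := by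
  simp only [ssV, ssValue, ssMems_preserve array m0 w.toNat w x h]

theorem ssV_zero (array : List Int) (m0 : PySem.Dict Int (Option (List Int)))
    (h : m0.get? 0 = none) : ssV array m0 0 = some [] := by
  simp only [ssV, Int.toNat_zero, ssMems, ssValue, h]
  simp

theorem ssV_neg (array : List Int) (m0 : PySem.Dict Int (Option (List Int))) (w : Int)
    (hw : w < 0) (h : m0.get? w = none) : ssV array m0 w = none := by
  have : w.toNat = 0 := by omega
  simp only [ssV, ssValue, this, ssMems, h]
  simp [show w ≠ 0 by omega]

theorem ssV_pos (array : List Int) (hpos : ∀ a ∈ array, 0 < a)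
    (m0 : PySem.Dict Int (Option (List Int))) (w : Int) (hw : 0 < w) (h : m0.get? w = none) :
    (ssMems array m0 w.toNat).get? w
        = some (ssFoldP array (fun item => ssV array m0 (w - item)) none)
      ∧ ssV array m0 w = ssFoldP array (fun item => ssV array m0 (w - item)) none := by
  obtain ⟨k, hk⟩ : ∃ k, w.toNat = k + 1 := ⟨w.toNat - 1, by omega⟩
  have hwk : w = (k : Int) + 1 := by omega
  have hnone : (ssMems array m0 k).get? w = none := by
    cases hg : (ssMems array m0 k).get? w with
    | none => rfl
    | some x =>
      rcases ssMems_keybound array m0 k w (by rw [hg]; simp) with h' | ⟨_, h2⟩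
      · exact absurd h h'
      · omega
  have := ssMems_stepval array hpos m0 k (by rw [← hwk]; exact hnone)
  rw [← hwk] at this
  rw [hk]
  refine ⟨this, ?_⟩
  simp only [ssV, ssValue, hk, this]

-- invariant on A's evolving memo dict
def ssGood (array : List Int) (m0 m : PySem.Dict Int (Option (List Int))) : Prop :=
  ∀ w : Int, m.get? w = m0.get? w ∨ (m0.get? w = none ∧ 0 < w ∧ m.get? w = some (ssV array m0 w))

theorem ssGood_value (array : List Int) (m0 m : PySem.Dict Int (Option (List Int)))
    (hg : ssGood array m0 m) (w : Int) (x : Option (List Int)) (h : m.get? w = some x) :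
    x = ssV array m0 w := by
  rcases hg w with h' | ⟨_, _, h'⟩
  · exact (ssV_mem array m0 w x (h' ▸ h)).symm
  · rw [h] at h'; exact Option.some.inj h'

theorem ssGood_none (array : List Int) (m0 m : PySem.Dict Int (Option (List Int)))
    (hg : ssGood array m0 m) (w : Int) (h : m.get? w = none) : m0.get? w = none := by
  rcases hg w with h' | ⟨h', _, _⟩
  · exact h' ▸ h
  · exact h'

-- MAIN LEMMA for A: under the invariant and with enough fuel, A returns ssV and preserves the invariant
theorem ssGo_main (array : List Int) (hpos : ∀ a ∈ array, 0 < a)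
    (m0 : PySem.Dict Int (Option (List Int))) :
    ∀ (f : Nat) (t : Int) (m : PySem.Dict Int (Option (List Int))), ssGood array m0 m → t.toNat < f →
      (shortestSumGo array f t m).1 = ssV array m0 t ∧ ssGood array m0 (shortestSumGo array f t m).2 := by
  intro f
  induction f with
  | zero => intro t m _ hf; omega
  | succ f ih =>
    intro t m hg hf
    cases hm : m.get? t with
    | some x =>
      simp only [shortestSumGo, hm]
      exact ⟨(ssGood_value array m0 m hg t x hm).symm ▸ rfl, hg⟩
    | none =>
      have h0 : m0.get? t = none := ssGood_none array m0 m hg t hm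
      rcases lt_trichotomy t 0 with ht | ht | ht
      · simp only [shortestSumGo, hm]
        rw [if_neg (by omega), if_pos ht]
        exact ⟨(ssV_neg array m0 t ht h0).symm, hg⟩
      · subst ht
        simp only [shortestSumGo, hm]
        exact ⟨(ssV_zero array m0 h0).symm, hg⟩
      · -- the recursive loop
        have hfold : ∀ (l : List Int), (∀ i ∈ l, 0 < i) →
            ∀ (cur : Option (List Int)) (m' : PySem.Dict Int (Option (List Int))), ssGood array m0 m' →
            (l.foldl (fun (p : (Option (List Int)) × PySem.Dict Int (Option (List Int))) item =>
              let res := shortestSumGo array f (t - item) p.2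
              match res.1 with
              | none => (p.1, res.2)
              | some r =>
                let result := r ++ [item]
                match p.1 with
                | none => (some result, res.2)
                | some s => if s.length > result.length then (some result, res.2) else (p.1, res.2)) (cur, m')).1
              = ssFoldP l (fun item => ssV array m0 (t - item)) cur
            ∧ ssGood array m0 (l.foldl (fun (p : (Option (List Int)) × PySem.Dict Int (Option (List Int))) item =>
              let res := shortestSumGo array f (t - item) p.2
              match res.1 with
              | none => (p.1, res.2)
              | some r =>
                let result := r ++ [item]
                match p.1 with
                | none => (some result, res.2)
                | some s => if s.length > result.length then (some result, res.2) else (p.1, res.2)) (cur, m')).2 := by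
          intro l hl
          induction l with
          | nil => intro cur m' hg'; exact ⟨rfl, hg'⟩
          | cons a l ihl =>
            intro cur m' hg'
            have ha : 0 < a := hl a (by simp)
            have hfa : (t - a).toNat < f := by omega
            obtain ⟨hv, hg''⟩ := ih (t - a) m' hg' hfa
            simp only [List.foldl_cons, ssFoldP, hv]
            have hl' : ∀ i ∈ l, 0 < i := fun i hi => hl i (by simp [hi])
            cases hres : ssV array m0 (t - a) with
            | none => exact ihl hl' cur _ hg''
            | some r =>
              cases cur with
              | none => exact ihl hl' _ _ hg''
              | some s =>
                by_cases hlen : s.length > (r ++ [a]).length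
                · simp only [if_pos hlen]; exact ihl hl' _ _ hg''
                · simp only [if_neg hlen]; exact ihl hl' _ _ hg''
        simp only [shortestSumGo, hm]
        rw [if_neg (by omega), if_neg (by omega)]
        obtain ⟨hv, hg'⟩ := hfold array hpos none m hg
        obtain ⟨_, hVt⟩ := ssV_pos array hpos m0 t ht h0
        rw [hv, ← hVt]
        refine ⟨rfl, ?_⟩
        intro w
        rcases eq_or_ne w t with rfl | hne
        · rw [PySem.Dict.get?_insert_self]
          exact Or.inr ⟨h0, ht, rfl⟩
        · rw [PySem.Dict.get?_insert_of_ne _ _ hne]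
          exact hg' w

-- B's range fold is ssMems
theorem ssAlt_fold_eq_mems (array : List Int) (m0 : PySem.Dict Int (Option (List Int))) (n : Nat) :
    ((PySem.List.pyRange 1 ((n : Int) + 1) 1).foldl (ssStep array) m0) = ssMems array m0 n := by
  induction n with
  | zero => simp [PySem.List.pyRange, ssMems]
  | succ n ihn =>
    rw [show ((n + 1 : Nat) : Int) + 1 = (n : Int) + 1 + 1 from by push_cast; ring]
    have : PySem.List.pyRange 1 ((n : Int) + 1 + 1) 1
        = PySem.List.pyRange 1 ((n : Int) + 1) 1 ++ [(n : Int) + 1] := by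
      simpa using PySem.List.pyRange_one_succ_right (a := 1) (b := (n : Int) + 1) (by omega)
    rw [this, List.foldl_append]
    simp only [List.foldl_cons, List.foldl_nil, ihn]
    rfl

-- B returns ssV
theorem ssAlt_eq_V (array : List Int) (hpos : ∀ a ∈ array, 0 < a)
    (t : Int) (mem : List (Int × Option (List Int))) :
    shortest_sum_alt t array mem = ssV array (PySem.Dict.ofList mem) t := by
  set m0 := PySem.Dict.ofList mem with hm0
  cases hm : m0.get? t with
  | some x =>
    simp only [shortest_sum_alt, ← hm0, hm]
    exact (ssV_mem array m0 t x hm).symm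
  | none =>
    rcases lt_trichotomy t 0 with ht | ht | ht
    · simp only [shortest_sum_alt, ← hm0, hm]
      rw [if_neg (by omega), if_pos ht]
      exact (ssV_neg array m0 t ht hm).symm
    · subst ht
      simp only [shortest_sum_alt, ← hm0, hm]
      exact (ssV_zero array m0 hm).symm
    · obtain ⟨hget, hVt⟩ := ssV_pos array hpos m0 t ht hm
      simp only [shortest_sum_alt, ← hm0, hm]
      rw [if_neg (by omega), if_neg (by omega)]
      obtain ⟨n, hn⟩ : ∃ n : Nat, t = (n : Int) := ⟨t.toNat, by omega⟩
      have hfold := ssAlt_fold_eq_mems array m0 n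
      subst hn
      simp only [hfold]
      rw [show ((n : Int)).toNat = n from by omega] at hget
      rw [hget]
      simp [hVt]

-- ===== VERDICT (by name: the statement is the Claim_ definition above) =====
theorem shortest_sum_spec : Claim_equal_shortest_sum := by
  intro t array mem _ hpre
  unfold Spec_shortest_sum
  set m0 := PySem.Dict.ofList mem with hm0
  rcases hpre with hpos | hpre
  · -- all positive: both sides equal ssV t
    have hgood : ssGood array m0 m0 := fun w => Or.inl rfl
    have hA := ssGo_main array hpos m0 (t.toNat + 1) t m0 hgood (by omega)
    have hB := ssAlt_eq_V array hpos t mem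
    simp only [shortest_sum, ← hm0, hA.1, hB]
  · -- short-circuit cases: no recursion happens in either program
    have hm : m0.get? t ≠ none ∨ t ≤ 0 := by
      rcases hpre with h | h
      · left; rw [PySem.Dict.contains_eq_isSome_get?] at h
        intro hn; rw [hn] at h; simp at h
      · right; exact h
    cases hg : m0.get? t with
    | some x =>
      simp only [shortest_sum, shortest_sum_alt, shortestSumGo, ← hm0, hg]
    | none =>
      have ht : t ≤ 0 := by
        rcases hm with h | h
        · exact absurd hg h
        · exact h
      rcases lt_or_eq_of_le ht with ht | ht
      · simp only [shortest_sum, shortest_sum_alt, shortestSumGo, ← hm0, hg]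
        rw [if_neg (by omega), if_pos ht, if_neg (by omega), if_pos ht]
      · subst ht
        simp only [shortest_sum, shortest_sum_alt, shortestSumGo, ← hm0, hg]
        simp
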